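-- pv_equiv track=rewrite | github.com/NicholasAntoniadesEngineer/llm_game | orchestration/placement.py | _find_connected_clusters
-- ===== SOURCE A (Python) =====
-- def _cardinally_adjacent_to_set(footprint: set[tuple[int, int]], target: set[tuple[int, int]]) -> bool:
--     if not footprint or not target:
--         return False
--     for x, y in footprint:
--         for nx, ny in ((x + 1, y), (x - 1, y), (x, y + 1), (x, y - 1)):
--             if (nx, ny) in target:
--                 return True
--     return False
--
-- def _find_connected_clusters(clusters: list[set], road_tiles: set) -> list[set]:
--     """Find which building clusters are connected via roads."""
--     connected_clusters = []
--
--     for cluster in clusters: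
--         # Check if cluster has road access
--         has_road_access = any(
--             _cardinally_adjacent_to_set({tile}, road_tiles)
--             for tile in cluster
--         )
--
--         if has_road_access:
--             # Find all clusters connected through this one
--             connected_group = {frozenset(cluster)}
--
--             # Simple connectivity: clusters that share road access
--             for other_cluster in clusters:
--                 if other_cluster == cluster:
--                     continue
--
--                 other_has_access = any(
--                     _cardinally_adjacent_to_set({tile}, road_tiles)
--                     for tile in other_cluster
--                 )
--
--                 if other_has_access:
--                     # Check if they could be connected (simplified)
--                     min_distance = min(
--                         abs(tx - ox) + abs(ty - oy)
--                         for tx, ty in cluster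
--                         for ox, oy in other_cluster
--                     )
--                     if min_distance < 20:  # Within reasonable connection distance
--                         connected_group.add(frozenset(other_cluster))
--
--             # Merge connected clusters
--             merged_cluster = set()
--             for c in connected_group:
--                 merged_cluster.update(c)
--             connected_clusters.append(merged_cluster)
--
--     return connected_clusters
-- ===== SOURCE B (Python) =====
-- def _find_connected_clusters(clusters: list[set], road_tiles: set) -> list[set]:
--     """Find which building clusters are connected via roads.
--
--     Proximity (min Manhattan distance < 20) is tested by stamping a
--     precomputed radius-19 diamond stencil of offsets around each tile and
--     probing the other cluster's set for membership, instead of computing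
--     distances for every pair of tiles; road access is computed once, in a
--     single staged filter pass.
--     """
--     near = [(dx, dy)
--             for dx in range(-19, 20)
--             for dy in range(abs(dx) - 19, 20 - abs(dx))]
--
--     accessible = [c for c in clusters
--                   if any((x + dx, y + dy) in road_tiles
--                          for x, y in c
--                          for dx, dy in ((1, 0), (-1, 0), (0, 1), (0, -1)))]
--
--     result = []
--     for c in accessible:
--         merged = set(c)
--         for o in accessible:
--             if any((x + dx, y + dy) in o for x, y in c for dx, dy in near):
--                 merged |= o
--         result.append(merged)
--     return result
-- ===== Notes on version B (the rewrite author's own statement) =====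
-- stated objective: alternative
-- what changed: B replaces A's full min over all tile-pair Manhattan distances (and A's re-testing of every other cluster's road access inside the per-cluster loop) by a precomputed radius-19 diamond stencil of 761 offsets stamped around each tile and probed against the other cluster's hash set, with road access computed once in a staged filter pass; it trades the O(T^2) per-pair distance min for O(T * 761) set probes, which wins for large clusters and loses for many tiny far-apart clusters.
import Mathlib
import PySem

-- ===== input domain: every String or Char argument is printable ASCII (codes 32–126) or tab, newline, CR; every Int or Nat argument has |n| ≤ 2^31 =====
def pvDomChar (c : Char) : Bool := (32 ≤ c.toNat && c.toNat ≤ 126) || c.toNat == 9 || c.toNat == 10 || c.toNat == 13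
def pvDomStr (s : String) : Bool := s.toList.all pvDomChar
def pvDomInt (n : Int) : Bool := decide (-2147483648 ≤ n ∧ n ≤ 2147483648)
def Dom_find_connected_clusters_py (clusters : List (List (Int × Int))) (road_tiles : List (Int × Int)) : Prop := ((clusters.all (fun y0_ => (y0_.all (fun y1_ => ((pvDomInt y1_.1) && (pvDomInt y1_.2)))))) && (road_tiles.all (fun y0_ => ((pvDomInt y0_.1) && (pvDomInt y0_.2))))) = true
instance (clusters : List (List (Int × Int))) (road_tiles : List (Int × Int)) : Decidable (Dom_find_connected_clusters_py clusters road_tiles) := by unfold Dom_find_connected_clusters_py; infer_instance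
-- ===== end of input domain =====

-- B tests proximity by stamping a precomputed radius-19 diamond stencil around each tile
-- and probing the other cluster's set, instead of A's full min over all tile-pair distances,
-- and computes road access once in a staged filter pass; same cost class overall.


-- ===== PORT A =====
def pvCardAdjSet (footprint target : List (Int × Int)) : Bool :=
  if footprint.isEmpty || target.isEmpty then false
  else footprint.any (fun t =>
    [(t.1 + 1, t.2), (t.1 - 1, t.2), (t.1, t.2 + 1), (t.1, t.2 - 1)].any
      (fun n => PySem.Set.contains target n))

def pvHasRoadAccess (cluster road_tiles : List (Int × Int)) : Bool :=
  cluster.any (fun tile => pvCardAdjSet [tile] road_tiles)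

-- min(|tx-ox|+|ty-oy| for all pairs) < 20; the none arm is unreachable (both clusters nonempty at the call)
def pvMinDistLt20 (cluster other : List (Int × Int)) : Bool :=
  match PySem.List.min?
      (cluster.flatMap (fun t => other.map (fun o => |t.1 - o.1| + |t.2 - o.2|)))
      (fun d => d) with
  | some md => decide (md < 20)
  | none => false

-- connected_group.add(frozenset(other_cluster)): a set of frozensets, membership by set equality
def pvGroupAdd (g : List (List (Int × Int))) (c : List (Int × Int)) : List (List (Int × Int)) :=
  if g.any (fun m => PySem.Set.equal m c) then g else g ++ [c]

def find_connected_clusters_py (clusters : List (List (Int × Int))) (road_tiles : List (Int × Int)) : List (List (Int × Int)) :=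
  clusters.foldl (fun connected_clusters cluster =>
    if pvHasRoadAccess cluster road_tiles then
      let connected_group :=
        clusters.foldl (fun g other =>
          if PySem.Set.equal other cluster then g
          else if pvHasRoadAccess other road_tiles then
            (if pvMinDistLt20 cluster other then pvGroupAdd g other else g)
          else g) [cluster]
      let merged := connected_group.foldl (fun m c => PySem.Set.update m c) PySem.Set.empty
      connected_clusters ++ [merged]
    else connected_clusters) []

-- ===== PORT B =====
-- the radius-19 diamond stencil: all offsets with |dx|+|dy| ≤ 19
def pvNear : List (Int × Int) :=
  (PySem.List.pyRange (-19) 20 1).flatMap (fun dx =>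
    (PySem.List.pyRange (|dx| - 19) (20 - |dx|) 1).map (fun dy => (dx, dy)))

def pvAltHasAccess (cluster road_tiles : List (Int × Int)) : Bool :=
  cluster.any (fun t =>
    [((1 : Int), (0 : Int)), (-1, 0), (0, 1), (0, -1)].any
      (fun d => PySem.Set.contains road_tiles (t.1 + d.1, t.2 + d.2)))

def pvAltClose (c o : List (Int × Int)) : Bool :=
  c.any (fun t => pvNear.any (fun d => PySem.Set.contains o (t.1 + d.1, t.2 + d.2)))

def find_connected_clusters_py_alt (clusters : List (List (Int × Int))) (road_tiles : List (Int × Int)) : List (List (Int × Int)) :=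
  let accessible := clusters.filter (fun c => pvAltHasAccess c road_tiles)
  accessible.map (fun c =>
    accessible.foldl (fun merged o =>
      if pvAltClose c o then PySem.Set.update merged o else merged)
      (PySem.Set.ofList c))

-- ===== PRECONDITION & SPEC =====
def Spec_find_connected_clusters_py (clusters : List (List (Int × Int))) (road_tiles : List (Int × Int)) (out : List (List (Int × Int))) : Prop := out = find_connected_clusters_py_alt clusters road_tiles
instance (clusters : List (List (Int × Int))) (road_tiles : List (Int × Int)) (out : List (List (Int × Int))) : Decidable (Spec_find_connected_clusters_py clusters road_tiles out) := by unfold Spec_find_connected_clusters_py; infer_instance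

-- ===== CLAIM (what is proved, stated in full; the proofs are below) =====
def Claim_equal_find_connected_clusters_py : Prop := ∀ (clusters : List (List (Int × Int))) (road_tiles : List (Int × Int)), Dom_find_connected_clusters_py clusters road_tiles → Spec_find_connected_clusters_py clusters road_tiles (find_connected_clusters_py clusters road_tiles)

-- ===== LEMMAS AND PROOFS =====

-- the two access tests agree
theorem access_eq (c r : List (Int × Int)) : pvHasRoadAccess c r = pvAltHasAccess c r := by
  unfold pvHasRoadAccess pvAltHasAccess pvCardAdjSet
  cases r with
  | nil => simp
  | cons a t => simp [add_zero, sub_eq_add_neg]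

theorem access_ne_nil {c r : List (Int × Int)} (h : pvHasRoadAccess c r = true) : c ≠ [] := by
  unfold pvHasRoadAccess at h
  rcases List.any_eq_true.mp h with ⟨x, hx, _⟩
  exact List.ne_nil_of_mem hx

-- the stencil contains exactly the offsets at Manhattan distance ≤ 19
theorem mem_pvNear (d : Int × Int) : d ∈ pvNear ↔ |d.1| + |d.2| ≤ 19 := by
  obtain ⟨dx, dy⟩ := d
  unfold pvNear
  simp only [List.mem_flatMap, List.mem_map, PySem.List.mem_pyRange_one, Prod.mk.injEq]
  constructor
  · rintro ⟨a, ⟨h1, h2⟩, b, ⟨h3, h4⟩, rfl, rfl⟩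
    simp only [Int.abs_eq_natAbs] at *
    omega
  · intro h
    simp only [Int.abs_eq_natAbs] at *
    exact ⟨dx, by omega, dy, by constructor <;> omega, rfl, rfl⟩

-- B's stencil probe holds iff some tile pair is within Manhattan distance < 20
theorem close_iff (c o : List (Int × Int)) :
    pvAltClose c o = true ↔ ∃ t ∈ c, ∃ p ∈ o, |t.1 - p.1| + |t.2 - p.2| < 20 := by
  unfold pvAltClose
  simp only [List.any_eq_true, PySem.Set.contains_iff]
  constructor
  · rintro ⟨t, ht, d, hd, hmem⟩
    have := (mem_pvNear d).mp hd
    exact ⟨t, ht, (t.1 + d.1, t.2 + d.2), hmem,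
      by simp only [Int.abs_eq_natAbs] at this ⊢; omega⟩
  · rintro ⟨t, ht, p, hp, hlt⟩
    refine ⟨t, ht, (p.1 - t.1, p.2 - t.2),
      (mem_pvNear _).mpr (by simp only [Int.abs_eq_natAbs] at hlt ⊢; omega), ?_⟩
    have : (t.1 + (p.1 - t.1), t.2 + (p.2 - t.2)) = p := by
      obtain ⟨p1, p2⟩ := p; simp only [Prod.mk.injEq]; omega
    rwa [this]

-- running min over a nonempty list is < 20 iff some element is < 20
theorem foldl_min_lt (t : List Int) (x : Int) :
    (t.foldl min x < 20) ↔ (x < 20 ∨ ∃ y ∈ t, y < 20) := by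
  induction t generalizing x with
  | nil => simp
  | cons a t ih =>
    simp only [List.foldl_cons, ih, min_lt_iff, List.mem_cons]
    constructor
    · rintro ((h | h) | ⟨y, hy, hlt⟩)
      · exact Or.inl h
      · exact Or.inr ⟨a, Or.inl rfl, h⟩
      · exact Or.inr ⟨y, Or.inr hy, hlt⟩
    · rintro (h | ⟨y, (rfl | hy), hlt⟩)
      · exact Or.inl (Or.inl h)
      · exact Or.inl (Or.inr hlt)
      · exact Or.inr ⟨y, hy, hlt⟩

-- A's "min over all pair distances < 20" equals B's stencil test (both clusters nonempty)
theorem min_close (c o : List (Int × Int)) (hc : c ≠ []) (ho : o ≠ []) :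
    pvMinDistLt20 c o = pvAltClose c o := by
  unfold pvMinDistLt20
  have hne : c.flatMap (fun t => o.map (fun p => |t.1 - p.1| + |t.2 - p.2|)) ≠ [] := by
    rcases List.exists_mem_of_ne_nil c hc with ⟨t, ht⟩
    rcases List.exists_mem_of_ne_nil o ho with ⟨p, hp⟩
    intro h
    have : (|t.1 - p.1| + |t.2 - p.2|) ∈ c.flatMap (fun t => o.map (fun p => |t.1 - p.1| + |t.2 - p.2|)) := by
      simp only [List.mem_flatMap, List.mem_map]
      exact ⟨t, ht, p, hp, rfl⟩
    simp [h] at this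
  rcases hl : c.flatMap (fun t => o.map (fun p => |t.1 - p.1| + |t.2 - p.2|)) with _ | ⟨x, tl⟩
  · exact absurd hl hne
  · rw [hl, PySem.List.min?_id_cons]
    have hmem : ∀ y : Int, (y ∈ x :: tl) ↔
        ∃ t ∈ c, ∃ p ∈ o, y = |t.1 - p.1| + |t.2 - p.2| := by
      intro y; rw [← hl]; simp [List.mem_flatMap, List.mem_map, eq_comm]
    have hclose : pvAltClose c o = true ↔ (x < 20 ∨ ∃ y ∈ tl, y < 20) := by
      rw [close_iff]
      constructor
      · rintro ⟨t, ht, p, hp, hlt⟩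
        have : (|t.1 - p.1| + |t.2 - p.2|) ∈ x :: tl := (hmem _).mpr ⟨t, ht, p, hp, rfl⟩
        rcases List.mem_cons.mp this with h | h
        · left; omega
        · right; exact ⟨_, h, hlt⟩
      · rintro (h | ⟨y, hy, hlt⟩)
        · rcases (hmem x).mp (List.mem_cons_self) with ⟨t, ht, p, hp, hxy⟩
          exact ⟨t, ht, p, hp, by omega⟩
        · rcases (hmem y).mp (List.mem_cons.mpr (Or.inr hy)) with ⟨t, ht, p, hp, hxy⟩
          exact ⟨t, ht, p, hp, by omega⟩
    show decide (tl.foldl min x < 20) = pvAltClose c o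
    rw [← foldl_min_lt] at hclose
    rcases h20 : pvAltClose c o with _ | _
    · simp only [decide_eq_false_iff_not]
      intro hcon
      have := hclose.mpr hcon
      simp [h20] at this
    · simp only [decide_eq_true_eq]
      exact hclose.mp h20

-- membership in the merge (union) of a group of clusters
theorem mem_mergeAll (g : List (List (Int × Int))) (x : Int × Int) :
    x ∈ g.foldl (fun m c => PySem.Set.update m c) PySem.Set.empty ↔ ∃ s ∈ g, x ∈ s := by
  suffices h : ∀ (m : List (Int × Int)),
      x ∈ g.foldl (fun m c => PySem.Set.update m c) m ↔ x ∈ m ∨ ∃ s ∈ g, x ∈ s by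
    rw [h]; simp [PySem.Set.empty]
  induction g with
  | nil => simp
  | cons a g ih =>
    intro m
    simp only [List.foldl_cons, ih, PySem.Set.mem_update, List.mem_cons]
    constructor
    · rintro ((h | h) | ⟨s, hs, hx⟩)
      · exact Or.inl h
      · exact Or.inr ⟨a, Or.inl rfl, h⟩
      · exact Or.inr ⟨s, Or.inr hs, hx⟩
    · rintro (h | ⟨s, (rfl | hs), hx⟩)
      · exact Or.inl (Or.inl h)
      · exact Or.inl (Or.inr hx)
      · exact Or.inr ⟨s, hs, hx⟩

-- updating with elements that are already present is a no-op
theorem update_of_subset {m l : List (Int × Int)} (h : ∀ x ∈ l, x ∈ m) :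
    PySem.Set.update m l = m := by
  induction l generalizing m with
  | nil => simp [PySem.Set.update]
  | cons a l ih =>
    rw [PySem.Set.update_cons, PySem.Set.add_of_mem (h a (List.mem_cons_self))]
    exact ih (fun x hx => h x (List.mem_cons_of_mem _ hx))

-- set-equal lists satisfy the same `any`
theorem any_of_equal {a b : List (Int × Int)} (h : PySem.Set.equal a b = true)
    (p : (Int × Int) → Bool) : a.any p = b.any p := by
  have hm := (PySem.Set.equal_iff a b).mp h
  cases hb : b.any p
  · simp only [List.any_eq_false] at hb ⊢
    intro x hx; exact hb x ((hm x).mp hx)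
  · rcases List.any_eq_true.mp hb with ⟨x, hx, hp⟩
    exact List.any_eq_true.mpr ⟨x, (hm x).mpr hx, hp⟩

-- the heart: merging A's group fold equals B's direct conditional-union fold
theorem fold_merge (cluster road : List (Int × Int))
    (hacc : pvHasRoadAccess cluster road = true) :
    ∀ (l : List (List (Int × Int))) (g : List (List (Int × Int))), cluster ∈ g →
      ((l.foldl (fun g other =>
          if PySem.Set.equal other cluster then g
          else if pvHasRoadAccess other road then
            (if pvMinDistLt20 cluster other then pvGroupAdd g other else g)
          else g) g).foldl (fun m c => PySem.Set.update m c) PySem.Set.empty)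
      = l.foldl (fun m o =>
          if pvAltHasAccess o road && pvAltClose cluster o then PySem.Set.update m o else m)
          (g.foldl (fun m c => PySem.Set.update m c) PySem.Set.empty) := by
  have hcne : cluster ≠ [] := access_ne_nil hacc
  intro l
  induction l with
  | nil => intro g hg; rfl
  | cons o l ih =>
    intro g hg
    simp only [List.foldl_cons]
    by_cases heq : PySem.Set.equal o cluster = true
    · -- A skips the equal cluster; B unions a set whose elements are already merged
      have hmemo : ∀ x ∈ o, x ∈ cluster := fun x hx => ((PySem.Set.equal_iff o cluster).mp heq x).mp hx
      have hoacc : pvHasRoadAccess o road = true := by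
        unfold pvHasRoadAccess at hacc ⊢
        rw [any_of_equal heq]; exact hacc
      have hone : o ≠ [] := access_ne_nil hoacc
      have hclose : pvAltClose cluster o = true := by
        rcases List.exists_mem_of_ne_nil o hone with ⟨t, ht⟩
        exact (close_iff cluster o).mpr ⟨t, hmemo t ht, t, ht, by simp⟩
      rw [if_pos heq, ← access_eq o road, hoacc, hclose, Bool.and_self, if_pos rfl]
      rw [update_of_subset (fun x hx => (mem_mergeAll g x).mpr ⟨cluster, hg, hmemo x hx⟩)]
      exact ih g hg
    · rw [if_neg heq, ← access_eq o road]
      by_cases hoacc : pvHasRoadAccess o road = true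
      · have hone : o ≠ [] := access_ne_nil hoacc
        rw [if_pos hoacc, hoacc, Bool.true_and, min_close cluster o hcne hone]
        by_cases hcl : pvAltClose cluster o = true
        · rw [if_pos hcl, if_pos hcl]
          by_cases hpres : g.any (fun m => PySem.Set.equal m o) = true
          · rcases List.any_eq_true.mp hpres with ⟨s, hs, hso⟩
            have hga : pvGroupAdd g o = g := by unfold pvGroupAdd; rw [if_pos hpres]
            rw [hga,
              update_of_subset (fun x hx =>
                (mem_mergeAll g x).mpr ⟨s, hs, ((PySem.Set.equal_iff s o).mp hso x).mpr hx⟩)]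
            exact ih g hg
          · have hga : pvGroupAdd g o = g ++ [o] := by unfold pvGroupAdd; rw [if_neg hpres]
            rw [hga, ih (g ++ [o]) (List.mem_append_left _ hg), List.foldl_append]
            rfl
        · rw [if_neg hcl, if_neg hcl]
          exact ih g hg
      · have hoacc' : pvHasRoadAccess o road = false := by
          cases h : pvHasRoadAccess o road
          · rfl
          · exact absurd h hoacc
        rw [if_neg hoacc, hoacc', Bool.false_and, if_neg (by simp)]
        exact ih g hg

-- A's per-cluster merged set, named for the assembly proof
def pvMergedA (clusters : List (List (Int × Int))) (road cluster : List (Int × Int)) : List (Int × Int) :=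
  (clusters.foldl (fun g other =>
      if PySem.Set.equal other cluster then g
      else if pvHasRoadAccess other road then
        (if pvMinDistLt20 cluster other then pvGroupAdd g other else g)
      else g) [cluster]).foldl (fun m c => PySem.Set.update m c) PySem.Set.empty

-- B's per-cluster merged set, named for the assembly proof
def pvMergedB (acc : List (List (Int × Int))) (c : List (Int × Int)) : List (Int × Int) :=
  acc.foldl (fun merged o =>
    if pvAltClose c o then PySem.Set.update merged o else merged) (PySem.Set.ofList c)

theorem mergedA_eq_mergedB (clusters : List (List (Int × Int))) (road cluster : List (Int × Int))
    (hacc : pvHasRoadAccess cluster road = true) :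
    pvMergedA clusters road cluster
      = pvMergedB (clusters.filter (fun c => pvAltHasAccess c road)) cluster := by
  unfold pvMergedA pvMergedB
  rw [fold_merge cluster road hacc clusters [cluster] (List.mem_singleton.mpr rfl)]
  rw [← PySem.List.foldl_if_eq_foldl_filter (fun c => pvAltHasAccess c road)
      (fun m o => if pvAltClose cluster o then PySem.Set.update m o else m)]
  have hbase : ([cluster].foldl (fun m c => PySem.Set.update m c) PySem.Set.empty)
      = PySem.Set.ofList cluster := by
    simp [PySem.Set.empty, PySem.Set.update_nil_left]
  rw [hbase]
  congr 1
  funext m o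
  by_cases h1 : pvAltHasAccess o road = true
  · by_cases h2 : pvAltClose cluster o = true <;> simp [h1, h2]
  · have h1' : pvAltHasAccess o road = false := by
      cases h : pvAltHasAccess o road
      · rfl
      · exact absurd h h1
    simp [h1']

-- ===== VERDICT (by name: the statement is the Claim_ definition above) =====
theorem find_connected_clusters_py_spec : Claim_equal_find_connected_clusters_py := by
  intro clusters road _
  unfold Spec_find_connected_clusters_py
  have hA : find_connected_clusters_py clusters road
      = clusters.foldl (fun acc c =>
          if pvHasRoadAccess c road then acc ++ [pvMergedA clusters road c] else acc) [] := rfl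
  have hB : find_connected_clusters_py_alt clusters road
      = (clusters.filter (fun c => pvAltHasAccess c road)).map
          (pvMergedB (clusters.filter (fun c => pvAltHasAccess c road))) := rfl
  rw [hA, hB]
  rw [PySem.List.foldl_if_eq_foldl_filter (fun c => pvHasRoadAccess c road)
      (fun acc c => acc ++ [pvMergedA clusters road c])]
  have hfe : clusters.filter (fun c => pvHasRoadAccess c road)
      = clusters.filter (fun c => pvAltHasAccess c road) := by
    apply List.filter_congr
    intro c _; rw [access_eq]
  rw [hfe, PySem.List.foldl_append_singleton_eq_map, List.nil_append]
  apply List.map_congr_left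
  intro c hc
  have hacc : pvAltHasAccess c road = true := (List.mem_filter.mp hc).2
  rw [← access_eq] at hacc
  exact mergedA_eq_mergedB clusters road c hacc
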